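-- pv_equiv track=rewrite | github.com/jdfloresf/PruebaTec | main.py | cambiar_vocal
-- ===== SOURCE A (Python) =====
-- def cambiar_vocal(cadena: str) -> str:
--     vocales =  ['a', 'e', 'i', 'o', 'u']
--     caracter = ['x', '-', '+', '*', '&']
--     resultado = list(cadena)
--
--     for i in range(len(resultado)):
--         for j, k in zip(vocales,caracter):
--             if resultado[i] == j:
--                 resultado[i] = k
--     resultado = ''.join(resultado)
--
--     return resultado
-- ===== SOURCE B (Python) =====
-- def cambiar_vocal(cadena: str) -> str:
--     for v, r in zip('aeiou', 'x-+*&'):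
--         cadena = cadena.replace(v, r)
--     return cadena
-- ===== Notes on version B (the rewrite author's own statement) =====
-- stated objective: idiomatic
-- what changed: Instead of iterating over string positions with an inner vowel scan and in-place list mutation, B makes five staged whole-string passes, one str.replace per vowel/replacement pair (correct because no replacement character is itself a vowel).
import Mathlib
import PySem

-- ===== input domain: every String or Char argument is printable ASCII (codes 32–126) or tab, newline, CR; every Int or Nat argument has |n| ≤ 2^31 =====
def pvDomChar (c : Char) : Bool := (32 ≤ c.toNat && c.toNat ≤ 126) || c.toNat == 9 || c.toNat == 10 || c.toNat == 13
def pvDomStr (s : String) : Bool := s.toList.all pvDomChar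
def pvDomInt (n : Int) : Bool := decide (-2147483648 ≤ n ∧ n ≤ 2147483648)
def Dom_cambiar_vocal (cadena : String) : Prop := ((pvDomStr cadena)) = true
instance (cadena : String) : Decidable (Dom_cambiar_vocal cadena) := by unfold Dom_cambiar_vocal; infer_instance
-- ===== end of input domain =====

-- B replaces A's per-position loop with an inner vowel scan by five staged
-- whole-string replace passes, one per vowel/replacement pair (idiomatic).

-- ===== PORT A =====
-- literal port of A: mutate a char list in place, for each index scanning the
-- zipped vowel/replacement pairs (index i is always in range, so getD is exact)
def cambiar_vocal (cadena : String) : String :=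
  let vocales : List Char := ['a', 'e', 'i', 'o', 'u']
  let caracter : List Char := ['x', '-', '+', '*', '&']
  let resultado : List Char := cadena.toList
  let resultado :=
    (List.range resultado.length).foldl (fun res i =>
      (vocales.zip caracter).foldl
        (fun res jk => if res.getD i ' ' == jk.1 then res.set i jk.2 else res) res)
      resultado
  String.ofList resultado

-- ===== PORT B =====
-- port of B: fold over the five zipped (vowel, replacement) pairs, performing one
-- whole-string str.replace pass per pair
def cambiar_vocal_alt (cadena : String) : String :=
  (List.zip "aeiou".toList "x-+*&".toList).foldl
    (fun s vr => PySem.Str.replace s (String.ofList [vr.1]) (String.ofList [vr.2])) cadena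

-- ===== PRECONDITION & SPEC =====
def Spec_cambiar_vocal (cadena : String) (out : String) : Prop := out = cambiar_vocal_alt cadena
instance (cadena : String) (out : String) : Decidable (Spec_cambiar_vocal cadena out) := by unfold Spec_cambiar_vocal; infer_instance

-- ===== CLAIM (what is proved, stated in full; the proofs are below) =====
def Claim_equal_cambiar_vocal : Prop := ∀ (cadena : String), Dom_cambiar_vocal cadena → Spec_cambiar_vocal cadena (cambiar_vocal cadena)

-- ===== LEMMAS AND PROOFS =====

-- the per-character substitution A realises
def fA (c : Char) : Char :=
  if c == 'a' then 'x' else if c == 'e' then '-' else if c == 'i' then '+'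
  else if c == 'o' then '*' else if c == 'u' then '&' else c

-- a single-character substitution (what one replace pass does per character)
def sub1 (v r c : Char) : Char := if c = v then r else c

-- A's loop body (definitionally the step function of port A's outer foldl)
def stepA (res : List Char) (i : Nat) : List Char :=
  ((['a','e','i','o','u'] : List Char).zip ['x','-','+','*','&']).foldl
    (fun res jk => if res.getD i ' ' == jk.1 then res.set i jk.2 else res) res

lemma go_single (v r : Char) : ∀ (l acc : List Char),
    PySem.Chars.replace.go [v] [r] l.length l acc
      = acc.reverse ++ l.map (sub1 v r) := by
  intro l
  induction l with
  | nil => intro acc; simp [PySem.Chars.replace.go]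
  | cons c t ih =>
    intro acc
    rw [List.length_cons, PySem.Chars.replace.go]
    by_cases h : c = v
    · subst h
      rw [if_pos (by simp [List.isPrefixOf])]
      simp only [List.length_cons, List.length_nil, List.drop_succ_cons, List.drop_zero]
      rw [ih]
      simp [sub1]
    · have : ([v].isPrefixOf (c :: t)) = false := by
        simp [List.isPrefixOf, Ne.symm h]
      simp only [this, Bool.false_eq_true, if_neg, not_false_iff]
      rw [ih]
      simp [sub1, h]

lemma replace_single (s : List Char) (v r : Char) :
    PySem.Chars.replace s [v] [r] = s.map (sub1 v r) := by
  rw [PySem.Chars.replace]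
  simp [go_single]

-- five staged passes compose to fA on every character
lemma comp_eq_fA (c : Char) :
    sub1 'u' '&' (sub1 'o' '*' (sub1 'i' '+' (sub1 'e' '-' (sub1 'a' 'x' c)))) = fA c := by
  by_cases h1 : c = 'a' <;> by_cases h2 : c = 'e' <;> by_cases h3 : c = 'i' <;>
  by_cases h4 : c = 'o' <;> by_cases h5 : c = 'u' <;>
  simp_all [sub1, fA]

set_option maxHeartbeats 1000000 in
lemma alt_toList (cadena : String) :
    (cambiar_vocal_alt cadena).toList = cadena.toList.map fA := by
  have hz : List.zip "aeiou".toList "x-+*&".toList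
      = [('a','x'),('e','-'),('i','+'),('o','*'),('u','&')] := by decide
  unfold cambiar_vocal_alt
  rw [hz]
  simp only [List.foldl_cons, List.foldl_nil]
  simp only [PySem.Str.toList_replace, String.toList_ofList, replace_single, List.map_map]
  exact List.map_congr_left (fun c _ => comp_eq_fA c)

lemma inner_eq (res : List Char) (i : Nat) (h : i < res.length) :
    stepA res i = res.set i (fA (res.getD i ' ')) := by
  simp only [stepA, List.zip, List.zipWith, List.foldl]
  by_cases h1 : res.getD i ' ' = 'a' <;>
  by_cases h2 : res.getD i ' ' = 'e' <;>
  by_cases h3 : res.getD i ' ' = 'i' <;>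
  by_cases h4 : res.getD i ' ' = 'o' <;>
  by_cases h5 : res.getD i ' ' = 'u' <;>
  simp_all [fA, List.getD_eq_getElem?_getD]

lemma outer_eq : ∀ (n : Nat) (l : List Char), n ≤ l.length →
    (List.range n).foldl stepA l = (l.take n).map fA ++ l.drop n := by
  intro n
  induction n with
  | zero => intro l _; simp
  | succ n ih =>
    intro l hn
    have hlt : n < l.length := by omega
    rw [List.range_succ, List.foldl_append]
    rw [ih l (by omega)]
    rw [List.foldl_cons, List.foldl_nil, inner_eq _ _ (by simp; omega)]
    have hdrop : l.drop n = l[n] :: l.drop (n+1) := List.drop_eq_getElem_cons hlt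
    have hmlen : ((l.take n).map fA).length = n := by simp; omega
    have hget : ((l.take n).map fA ++ l.drop n).getD n ' ' = l[n] := by
      rw [List.getD_eq_getElem?_getD, List.getElem?_append_right (by omega), hmlen]
      simp [List.getElem?_eq_getElem hlt]
    have hset : ((l.take n).map fA ++ l.drop n).set n (fA l[n])
        = (l.take n).map fA ++ (fA l[n] :: l.drop (n+1)) := by
      rw [List.set_append_right _ _ (by omega), hmlen, hdrop]
      simp only [Nat.sub_self, List.set_cons_zero]
    rw [hget, hset]
    have htake : (List.map fA l).take (n+1) = (List.map fA l).take n ++ [fA l[n]] := by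
      rw [List.take_add_one]
      simp [List.getElem?_map, List.getElem?_eq_getElem hlt]
    rw [List.map_take, List.map_take, htake, List.append_assoc]
    rfl

-- ===== VERDICT (by name: the statement is the Claim_ definition above) =====
theorem cambiar_vocal_spec : Claim_equal_cambiar_vocal := by
  intro cadena _
  unfold Spec_cambiar_vocal
  have hA : cambiar_vocal cadena
      = String.ofList ((List.range cadena.toList.length).foldl stepA cadena.toList) := rfl
  rw [hA, outer_eq _ _ (le_refl _), List.take_length, List.drop_length, List.append_nil]
  rw [show cambiar_vocal_alt cadena = String.ofList ((cambiar_vocal_alt cadena).toList)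
    from (String.ofList_toList).symm, alt_toList]
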